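-- pv_equiv track=rewrite | github.com/yohperez/SciQuiz_Pro | project.py | filter_questions
-- ===== SOURCE A (Python) =====
-- def filter_questions(questions: list[dict],
--                      categories: list[str] | None = None,
--                      difficulty: str | None = None) -> list[dict]:
--     """Return a filtered subset of questions.
--
--     Args:
--         questions:   Full question bank.
--         categories:  List of category names to include (None = all).
--         difficulty:  'easy', 'medium', or 'hard' (None = all).
--
--     Returns:
--         Filtered list of question dicts.
--
--     Raises:
--         ValueError: if difficulty is not a valid value.
--     """
--     valid_difficulties = {None, "easy", "medium", "hard"}
--     if difficulty not in valid_difficulties: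
--         raise ValueError(f"difficulty must be one of {valid_difficulties}, got '{difficulty}'.")
--
--     result = questions
--     if categories:
--         result = [q for q in result if q["category"] in categories]
--     if difficulty:
--         result = [q for q in result if q["difficulty"] == difficulty]
--     return result
-- ===== SOURCE B (Python) =====
-- def filter_questions(questions: list[dict],
--                      categories: list[str] | None = None,
--                      difficulty: str | None = None) -> list[dict]:
--     """Index-based re-implementation: group positions by category in one dict pass,
--     select wanted positions via set union and sort them back into original order;
--     group by difficulty and read the requested bucket directly (no membership scans)."""
--     valid_difficulties = {None, "easy", "medium", "hard"}
--     if difficulty not in valid_difficulties: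
--         raise ValueError(f"difficulty must be one of {valid_difficulties}, got '{difficulty}'.")
--
--     result = questions
--     if categories:
--         index = {}
--         for pos, q in enumerate(result):
--             index.setdefault(q["category"], []).append(pos)
--         wanted = set()
--         for c in categories:
--             wanted.update(index.get(c, []))
--         result = [result[pos] for pos in sorted(wanted)]
--     if difficulty:
--         groups = {}
--         for q in result:
--             groups.setdefault(q["difficulty"], []).append(q)
--         result = groups.get(difficulty, [])
--     return result
-- ===== Notes on version B (the rewrite author's own statement) =====
-- stated objective: alternative
-- what changed: Replaces A's predicate-filter passes with a hash-index algorithm: positions are grouped by category in one dict pass, the wanted positions are the set union over the requested categories (sorted back into original order), and the difficulty stage groups questions by difficulty and reads the requested bucket directly, so the per-question 'in categories' list scan disappears.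
import Mathlib
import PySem

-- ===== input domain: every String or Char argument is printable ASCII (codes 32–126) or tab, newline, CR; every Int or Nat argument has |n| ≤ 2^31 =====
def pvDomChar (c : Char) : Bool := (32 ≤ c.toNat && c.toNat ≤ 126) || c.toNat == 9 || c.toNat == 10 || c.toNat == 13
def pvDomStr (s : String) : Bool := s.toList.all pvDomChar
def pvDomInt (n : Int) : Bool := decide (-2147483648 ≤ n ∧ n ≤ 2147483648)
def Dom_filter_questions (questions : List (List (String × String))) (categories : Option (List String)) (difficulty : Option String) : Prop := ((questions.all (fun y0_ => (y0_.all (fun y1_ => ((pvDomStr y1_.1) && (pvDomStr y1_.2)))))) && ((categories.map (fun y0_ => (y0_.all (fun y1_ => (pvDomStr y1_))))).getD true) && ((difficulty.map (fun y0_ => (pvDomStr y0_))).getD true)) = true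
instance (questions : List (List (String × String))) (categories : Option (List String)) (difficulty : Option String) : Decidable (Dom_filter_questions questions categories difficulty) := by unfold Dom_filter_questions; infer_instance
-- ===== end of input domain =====

-- B replaces A's predicate-filter passes by a hash-index algorithm: positions grouped by category, set union + sort for the kept positions, and a group-by-difficulty dict read directly.


-- ===== PORT A =====
-- first-match association-list lookup = Python dict subscript q[k] (none = KeyError, excluded by Pre_)
def pyLookup? (q : List (String × String)) (k : String) : Option String :=
  (q.find? (fun kv => kv.1 == k)).map (fun kv => kv.2)

def filter_questions (questions : List (List (String × String))) (categories : Option (List String)) (difficulty : Option String) : List (List (String × String)) :=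
  -- ValueError on invalid difficulty and KeyError on missing keys are excluded by Pre_;
  -- the .getD "" default only fires outside Pre_ (where Python raises KeyError).
  let result := questions
  let result :=
    match categories with
    | none => result
    | some cs =>
        if cs.isEmpty then result
        else result.filter (fun q => cs.contains ((pyLookup? q "category").getD ""))
  match difficulty with
  | none => result
  | some d =>
      if d = "" then result
      else result.filter (fun q => ((pyLookup? q "difficulty").getD "") == d)

-- ===== PORT B =====
-- Python truthiness of the two optional filters
def pyTruthyCats (categories : Option (List String)) : Bool :=
  match categories with | none => false | some cs => !cs.isEmpty
def pyTruthyDiff (difficulty : Option String) : Bool :=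
  match difficulty with | none => false | some d => !(d == "")

def filter_questions_alt (questions : List (List (String × String))) (categories : Option (List String)) (difficulty : Option String) : List (List (String × String)) :=
  let result := questions
  let result :=
    match categories with
    | none => result
    | some cs =>
        if cs.isEmpty then result
        else
          -- index: category -> list of positions (dict built by setdefault/append)
          let index : PySem.Dict String (List Int) :=
            (PySem.List.enumerate result).foldl
              (fun d p => d.modify ((pyLookup? p.2 "category").getD "") [] (fun l => l ++ [p.1]))
              PySem.Dict.empty
          -- wanted: set union of the position lists of the requested categories
          let wanted : PySem.Set Int :=
            cs.foldl (fun s c => s.update (index.getD c [])) PySem.Set.empty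
          (PySem.List.sorted wanted (fun i => i)).map
            (fun pos => (PySem.List.pyGet? result pos).getD [])
  match difficulty with
  | none => result
  | some d =>
      if d = "" then result
      else
        -- groups: difficulty -> list of questions; the answer is the bucket at d
        let groups : PySem.Dict String (List (List (String × String))) :=
          result.foldl
            (fun g q => g.modify ((pyLookup? q "difficulty").getD "") [] (fun l => l ++ [q]))
            PySem.Dict.empty
        groups.getD d []

-- ===== PRECONDITION & SPEC =====
-- Pre_ excludes exactly the inputs where Python A raises: ValueError (difficulty outside
-- {None,"easy","medium","hard"}) and KeyError (a question missing the "category" key while the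
-- category filter is active, or missing the "difficulty" key while the difficulty filter is
-- active and the question passed the category filter).
def Pre_filter_questions (questions : List (List (String × String))) (categories : Option (List String)) (difficulty : Option String) : Prop :=
  (difficulty = none ∨ difficulty = some "easy" ∨ difficulty = some "medium" ∨ difficulty = some "hard") ∧
  (pyTruthyCats categories = true → ∀ q ∈ questions, (pyLookup? q "category").isSome = true) ∧
  (pyTruthyDiff difficulty = true → ∀ q ∈ questions,
     (pyTruthyCats categories = true → (categories.getD []).contains ((pyLookup? q "category").getD "") = true) →
     (pyLookup? q "difficulty").isSome = true)
instance (questions : List (List (String × String))) (categories : Option (List String)) (difficulty : Option String) : Decidable (Pre_filter_questions questions categories difficulty) := by unfold Pre_filter_questions; infer_instance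

def pvWitness_filter_questions : (List (List (String × String))) × Option (List String) × Option String :=
  ([[("category", "c1"), ("difficulty", "easy")]], some ["c1"], some "easy")

def Spec_filter_questions (questions : List (List (String × String))) (categories : Option (List String)) (difficulty : Option String) (out : List (List (String × String))) : Prop := out = filter_questions_alt questions categories difficulty
instance (questions : List (List (String × String))) (categories : Option (List String)) (difficulty : Option String) (out : List (List (String × String))) : Decidable (Spec_filter_questions questions categories difficulty out) := by unfold Spec_filter_questions; infer_instance

-- ===== CLAIM (what is proved, stated in full; the proofs are below) =====
def Claim_equal_filter_questions : Prop := ∀ (questions : List (List (String × String))) (categories : Option (List String)) (difficulty : Option String), Dom_filter_questions questions categories difficulty → Pre_filter_questions questions categories difficulty → Spec_filter_questions questions categories difficulty (filter_questions questions categories difficulty)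

-- ===== LEMMAS AND PROOFS =====

-- a keyed group-by fold read back at key c is the filter at c (derived from the PySem pair-fold lemma)
theorem getD_groupby {α : Type} (key : α → String) (l : List α) (c : String) :
    (l.foldl (fun g q => g.modify (key q) [] (fun v => v ++ [q])) PySem.Dict.empty).getD c []
      = l.filter (fun q => key q == c) := by
  have h := PySem.Dict.getD_foldl_modify_append (l.map (fun q => (key q, q))) PySem.Dict.empty c
  rw [List.foldl_map] at h
  simpa [List.filter_map, Function.comp_def] using h

-- the same for the position index: positions grouped by category
theorem getD_posIndex (key : List (String × String) → String)
    (l : List (Int × List (String × String))) (c : String) :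
    (l.foldl (fun d p => d.modify (key p.2) [] (fun v => v ++ [p.1])) PySem.Dict.empty).getD c []
      = (l.filter (fun p => key p.2 == c)).map (fun p => p.1) := by
  have h := PySem.Dict.getD_foldl_modify_append (l.map (fun p => (key p.2, p.1))) PySem.Dict.empty c
  rw [List.foldl_map] at h
  simpa [List.filter_map, Function.comp_def] using h

theorem mem_foldl_update {α β : Type} [BEq α] [LawfulBEq α] (g : β → List α) (cs : List β)
    (s0 : PySem.Set α) (y : α) :
    (y ∈ cs.foldl (fun s c => s.update (g c)) s0) ↔ y ∈ s0 ∨ ∃ c ∈ cs, y ∈ g c := by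
  induction cs generalizing s0 with
  | nil => simp
  | cons c cs ih =>
      simp only [List.foldl_cons, ih, PySem.Set.mem_update, List.mem_cons]
      constructor
      · rintro (((h | h) | ⟨c', hc', h⟩))
        · exact Or.inl h
        · exact Or.inr ⟨c, Or.inl rfl, h⟩
        · exact Or.inr ⟨c', Or.inr hc', h⟩
      · rintro (h | ⟨c', (rfl | hc'), h⟩)
        · exact Or.inl (Or.inl h)
        · exact Or.inl (Or.inr h)
        · exact Or.inr ⟨c', hc', h⟩

theorem nodup_foldl_update {α β : Type} [BEq α] [LawfulBEq α] (g : β → List α) (cs : List β)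
    (s0 : PySem.Set α) (h : s0.Nodup) :
    (cs.foldl (fun s c => s.update (g c)) s0).Nodup := by
  induction cs generalizing s0 with
  | nil => exact h
  | cons c cs ih => exact ih _ (PySem.Set.nodup_update _ _ h)

-- members of enumerate: the position reads back the element
theorem enumerate_pyGet (xs : List (List (String × String))) (i : Int) (q : List (String × String))
    (h : (i, q) ∈ PySem.List.enumerate xs 0) : PySem.List.pyGet? xs i = some q := by
  rw [List.mem_iff_getElem] at h
  obtain ⟨k, hk, he⟩ := h
  rw [PySem.List.getElem_enumerate] at he
  obtain ⟨hi, hq⟩ := Prod.mk.injEq .. ▸ he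
  have hk' : k < xs.length := by
    have := hk; rwa [PySem.List.enumerate_eq_zipIdx_map, List.length_map, List.length_zipIdx] at this
  subst hq
  rw [← hi]
  simp [PySem.List.pyGet?_natCast, List.getElem?_eq_getElem hk']

-- B's category stage equals A's category filter
theorem cat_stage_eq (qs : List (List (String × String))) (cs : List String) :
    (PySem.List.sorted
        (cs.foldl
          (fun (s : PySem.Set Int) c => s.update
            (((PySem.List.enumerate qs).foldl
                (fun d p => d.modify ((pyLookup? p.2 "category").getD "") [] (fun l => l ++ [p.1]))
                PySem.Dict.empty).getD c []))
          PySem.Set.empty)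
        (fun i => i)).map (fun pos => (PySem.List.pyGet? qs pos).getD [])
      = qs.filter (fun q => cs.contains ((pyLookup? q "category").getD "")) := by
  rw [show (PySem.Set.empty : PySem.Set Int) = ([] : PySem.Set Int) from rfl]
  set key : List (String × String) → String := fun q => (pyLookup? q "category").getD "" with hkey
  set enumL := PySem.List.enumerate qs 0 with henum
  set T : List (Int × List (String × String)) :=
    enumL.filter (fun p => cs.contains (key p.2)) with hT
  set wanted := cs.foldl
      (fun (s : PySem.Set Int) c => s.update
        ((enumL.foldl (fun d p => d.modify (key p.2) [] (fun l => l ++ [p.1]))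
            PySem.Dict.empty).getD c []))
      ([] : PySem.Set Int) with hw
  -- step 1: sorted wanted = positions of T
  have hmem : ∀ y, y ∈ wanted ↔ y ∈ T.map (fun p => p.1) := by
    intro y
    rw [hw, mem_foldl_update]
    simp only [getD_posIndex, List.not_mem_nil, false_or, hT, List.mem_map,
      List.mem_filter]
    constructor
    · rintro ⟨c, hc, p, ⟨hpm, hpk⟩, rfl⟩
      exact ⟨p, ⟨hpm, by simp [beq_iff_eq] at hpk ⊢; exact hpk ▸ hc⟩, rfl⟩
    · rintro ⟨p, ⟨hpm, hpc⟩, rfl⟩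
      exact ⟨key p.2, by simpa [List.contains_iff_mem] using hpc, p, ⟨hpm, by simp⟩, rfl⟩
  have hpairT : T.Pairwise (fun a b => a.1 < b.1) :=
    (PySem.List.pairwise_lt_enumerate qs 0).sublist List.filter_sublist
  have hpairfst : (T.map (fun p => p.1)).Pairwise (fun a b => a < b) :=
    (List.pairwise_map).mpr hpairT
  have hnodT : (T.map (fun p => p.1)).Nodup := hpairfst.imp (fun h => ne_of_lt h)
  have hnodW : wanted.Nodup := nodup_foldl_update _ _ _ (by simp)
  have hperm : (T.map (fun p => p.1)).Perm wanted :=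
    (List.perm_ext_iff_of_nodup hnodT hnodW).mpr (fun y => (hmem y).symm)
  have hsorted : PySem.List.sorted wanted (fun i => i) = T.map (fun p => p.1) :=
    PySem.List.sorted_eq_of_perm_of_pairwise_lt wanted (T.map (fun p => p.1)) (fun i => i)
      hperm hpairfst
  rw [hsorted, List.map_map]
  -- step 2: reading positions back gives the filtered questions
  have hback : ∀ p ∈ T, ((fun pos => (PySem.List.pyGet? qs pos).getD []) ∘ fun p => p.1) p = p.2 := by
    rintro ⟨i, q⟩ hp
    have hmem' : (i, q) ∈ enumL := (List.mem_filter.mp hp).1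
    simp [Function.comp, enumerate_pyGet qs i q (henum ▸ hmem')]
  rw [List.map_congr_left hback, hT]
  calc (enumL.filter (fun p => cs.contains (key p.2))).map (fun p => p.2)
      = (enumL.map (fun p => p.2)).filter (fun q => cs.contains (key q)) := by
        simp [List.filter_map, Function.comp_def]
    _ = qs.filter (fun q => cs.contains (key q)) := by
        rw [henum, PySem.List.map_snd_enumerate]

-- B's difficulty stage equals A's difficulty filter
theorem diff_stage_eq (r : List (List (String × String))) (d : String) :
    (r.foldl
        (fun g q => g.modify ((pyLookup? q "difficulty").getD "") [] (fun l => l ++ [q]))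
        PySem.Dict.empty).getD d []
      = r.filter (fun q => ((pyLookup? q "difficulty").getD "") == d) :=
  getD_groupby (fun q => (pyLookup? q "difficulty").getD "") r d

-- the two ports agree on ALL inputs (Pre_ only marks where the Python raises)
theorem ports_eq_everywhere (questions : List (List (String × String))) (categories : Option (List String)) (difficulty : Option String) :
    filter_questions questions categories difficulty = filter_questions_alt questions categories difficulty := by
  rcases categories with _ | cs <;> rcases difficulty with _ | d <;>
    simp only [filter_questions, filter_questions_alt] <;>
    split_ifs <;>
    first
      | rfl
      | rw [diff_stage_eq, cat_stage_eq]
      | rw [diff_stage_eq]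
      | rw [cat_stage_eq]

-- ===== VERDICT (by name: the statement is the Claim_ definition above) =====
theorem filter_questions_spec : Claim_equal_filter_questions := by
  intro questions categories difficulty _ _
  unfold Spec_filter_questions
  exact ports_eq_everywhere questions categories difficulty
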